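-- pv_equiv track=rewrite | github.com/trueandre091/EGE | mar 25/14-03-25/Task-23-5937.py | f
-- ===== SOURCE A (Python) =====
-- def f(s, e, c=0):
--     if s == e and c <= 15:
--         return 1
--     if s > e:
--         return 0
--     return f(s + 2, e, c + (1 if (s + 2) % 2 == 0 else 0)) \
--             + f(s + 3, e, c + (1 if (s + 3) % 2 == 0 else 0)) \
--             + f(s * 2 + 1, e, c + (1 if (s * 2 + 1) % 2 == 0 else 0))
-- ===== SOURCE B (Python) =====
-- def f(s, e, c=0):
--     # Bottom-up DP over states (t, k): t = current node, k = counter value.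
--     if s > e:
--         return 0
--     dp = {}
--     for t in range(e, s - 1, -1):
--         for k in range(c, c + (t - s) + 1):
--             if t == e and k <= 15:
--                 dp[(t, k)] = 1
--             else:
--                 total = 0
--                 for nxt in (t + 2, t + 3, t * 2 + 1):
--                     if t < nxt <= e:
--                         total += dp[(nxt, k + (1 if nxt % 2 == 0 else 0))]
--                 dp[(t, k)] = total
--     return dp[(s, c)]
-- ===== Notes on version B (the rewrite author's own statement) =====
-- stated objective: alternative
-- what changed: Replaced the three-way branching recursion by a bottom-up dynamic program over (node t, counter k) states filled from e down to s, so each state is computed once; Pre_ excludes negative starts below e, where A's recursion never terminates (RecursionError).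
import Mathlib
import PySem

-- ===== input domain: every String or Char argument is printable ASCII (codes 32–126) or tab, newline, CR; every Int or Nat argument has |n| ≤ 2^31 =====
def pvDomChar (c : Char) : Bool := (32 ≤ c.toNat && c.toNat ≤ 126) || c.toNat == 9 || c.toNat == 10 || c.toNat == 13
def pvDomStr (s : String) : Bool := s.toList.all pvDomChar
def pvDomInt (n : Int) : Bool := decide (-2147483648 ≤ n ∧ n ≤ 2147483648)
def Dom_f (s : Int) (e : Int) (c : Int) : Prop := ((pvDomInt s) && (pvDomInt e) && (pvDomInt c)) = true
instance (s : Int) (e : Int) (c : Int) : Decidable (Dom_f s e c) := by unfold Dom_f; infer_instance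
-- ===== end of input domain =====

-- B replaces A's three-way branching recursion by a bottom-up DP over states (node, counter), each computed once (alternative algorithm).

-- ===== PORT A =====
-- fuel-indexed transliteration of A's recursion; 'f' supplies fuel that is
-- sufficient on every input of Pre_f (each recursive call increases s by ≥ 1 there)
def fA : Nat → Int → Int → Int → Int
  | 0, _, _, _ => 0
  | n+1, s, e, c =>
    if s = e ∧ c ≤ 15 then 1
    else if e < s then 0
    else fA n (s+2) e (c + (if PySem.Int.mod (s+2) 2 == 0 then 1 else 0))
       + fA n (s+3) e (c + (if PySem.Int.mod (s+3) 2 == 0 then 1 else 0))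
       + fA n (s*2+1) e (c + (if PySem.Int.mod (s*2+1) 2 == 0 then 1 else 0))

def f (s : Int) (e : Int) (c : Int) : Int := fA (e + 2 - s).toNat s e c

-- ===== PORT B =====
-- one DP cell: the body of B's innermost `for k` loop (dp[(nxt,…)] is always
-- present when read in Source B; getD 0 is exact there)
def bInner (e t : Int) (dp : PySem.Dict (Int × Int) Int) (k : Int) : PySem.Dict (Int × Int) Int :=
  if t = e ∧ k ≤ 15 then dp.insert (t, k) 1
  else
    dp.insert (t, k)
      ([t+2, t+3, t*2+1].foldl (fun total nxt =>
        if t < nxt ∧ nxt ≤ e then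
          total + dp.getD (nxt, k + (if PySem.Int.mod nxt 2 == 0 then 1 else 0)) 0
        else total) 0)

def f_alt (s : Int) (e : Int) (c : Int) : Int :=
  if e < s then 0
  else
    ((PySem.List.pyRange e (s-1) (-1)).foldl
        (fun dp t => (PySem.List.pyRange c (c + (t - s) + 1) 1).foldl (bInner e t) dp)
        PySem.Dict.empty).getD (s, c) 0

-- ===== PRECONDITION & SPEC =====
-- Pre_f excludes exactly the inputs where A never terminates (RecursionError):
-- s < 0 with s < e, or s = e < 0 with c > 15 (the branch s*2+1 descends forever).
def Pre_f (s : Int) (e : Int) (c : Int) : Prop := e < s ∨ 0 ≤ s ∨ (s = e ∧ c ≤ 15)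
instance (s : Int) (e : Int) (c : Int) : Decidable (Pre_f s e c) := by unfold Pre_f; infer_instance
def pvWitness_f : Int × Int × Int := (0, 5, 0)

def Spec_f (s : Int) (e : Int) (c : Int) (out : Int) : Prop := out = f_alt s e c
instance (s : Int) (e : Int) (c : Int) (out : Int) : Decidable (Spec_f s e c out) := by unfold Spec_f; infer_instance

-- ===== CLAIM (what is proved, stated in full; the proofs are below) =====
def Claim_equal_f : Prop := ∀ (s : Int) (e : Int) (c : Int), Dom_f s e c → Pre_f s e c → Spec_f s e c (f s e c)

-- ===== LEMMAS AND PROOFS =====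

-- the value A computes at a state, with canonical (sufficient) fuel
def fTrue (e t k : Int) : Int := fA (e + 2 - t).toNat t e k

theorem fA_gt (n : Nat) (s e c : Int) (h : e < s) : fA n s e c = 0 := by
  cases n with
  | zero => rfl
  | succ n => simp [fA]; omega

theorem fA_fuel (n : Nat) : ∀ (m : Nat) (s e c : Int), 0 ≤ s → (e + 1 - s).toNat < n →
    (e + 1 - s).toNat < m → fA n s e c = fA m s e c := by
  induction n with
  | zero => intro m s e c _ h _; omega
  | succ n ih =>
    intro m s e c hs hn hm
    obtain ⟨m', rfl⟩ : ∃ m', m = m' + 1 := ⟨m - 1, by omega⟩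
    by_cases h1 : s = e ∧ c ≤ 15
    · simp [fA, h1]
    · by_cases h2 : e < s
      · rw [fA_gt _ _ _ _ h2, fA_gt _ _ _ _ h2]
      · have hse : s ≤ e := le_of_not_gt h2
        simp only [fA, if_neg h1, if_neg h2]
        rw [ih m' (s+2) e _ (by omega) (by omega) (by omega),
            ih m' (s+3) e _ (by omega) (by omega) (by omega),
            ih m' (s*2+1) e _ (by omega) (by omega) (by omega)]

-- one DP cell is correct and only touches key (t, k)
theorem bInner_getD (s e c : Int) (hs : 0 ≤ s) (t k : Int)
    (ht1 : s ≤ t) (ht2 : t ≤ e) (hk1 : c ≤ k) (hk2 : k ≤ c + (t - s))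
    (dp : PySem.Dict (Int × Int) Int)
    (hInv : ∀ t' k', t + 1 ≤ t' → t' ≤ e → c ≤ k' → k' ≤ c + (t' - s) →
      dp.getD (t', k') 0 = fTrue e t' k') :
    ∀ q : Int × Int, (bInner e t dp k).getD q 0 =
      if q = (t, k) then fTrue e t k else dp.getD q 0 := by
  intro q
  unfold bInner
  by_cases h1 : t = e ∧ k ≤ 15
  · rw [if_pos h1, PySem.Dict.getD_insert]
    have hval : fTrue e t k = 1 := by
      obtain ⟨rfl, hk⟩ := h1
      unfold fTrue
      have h2 : (t + 2 - t).toNat = 2 := by omega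
      rw [h2]; simp [fA, hk]
    rw [hval]
  · rw [if_neg h1, PySem.Dict.getD_insert]
    have hne : ¬ e < t := by omega
    obtain ⟨n', hn1, hn2⟩ : ∃ n', (e + 2 - t).toNat = n' + 1 ∧ n' = (e + 1 - t).toNat :=
      ⟨(e + 1 - t).toNat, by omega, rfl⟩
    have step : ∀ (x nxt : Int), t + 1 ≤ nxt →
        (if t < nxt ∧ nxt ≤ e then
            x + dp.getD (nxt, k + (if PySem.Int.mod nxt 2 == 0 then 1 else 0)) 0
          else x) =
        x + fA n' nxt e (k + (if PySem.Int.mod nxt 2 == 0 then 1 else 0)) := by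
      intro x nxt hnxt
      have hd : (0:Int) ≤ (if PySem.Int.mod nxt 2 == 0 then (1:Int) else 0) ∧
          (if PySem.Int.mod nxt 2 == 0 then (1:Int) else 0) ≤ 1 := by split <;> omega
      by_cases hx : nxt ≤ e
      · rw [if_pos ⟨by omega, hx⟩,
            hInv nxt _ (by omega) hx (by omega) (by omega)]
        unfold fTrue
        rw [fA_fuel _ n' nxt e _ (by omega) (by omega) (by omega)]
      · rw [if_neg (by omega), fA_gt _ _ _ _ (by omega)]; ring
    have hval : fTrue e t k =
        [t+2, t+3, t*2+1].foldl (fun total nxt =>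
          if t < nxt ∧ nxt ≤ e then
            total + dp.getD (nxt, k + (if PySem.Int.mod nxt 2 == 0 then 1 else 0)) 0
          else total) 0 := by
      unfold fTrue
      rw [hn1]
      simp only [fA, if_neg h1, if_neg hne, List.foldl]
      rw [step 0 (t+2) (by omega), step _ (t+3) (by omega), step _ (t*2+1) (by omega)]
      ring
    rw [hval]

-- the inner `for k` loop fills exactly row t
theorem bRow_getD (s e c : Int) (hs : 0 ≤ s) (t : Int) (ht1 : s ≤ t) (ht2 : t ≤ e) :
    ∀ (n : Nat) (a : Int) (dp : PySem.Dict (Int × Int) Int),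
    (c + (t - s) + 1 - a).toNat = n → c ≤ a →
    (∀ t' k', t + 1 ≤ t' → t' ≤ e → c ≤ k' → k' ≤ c + (t' - s) →
      dp.getD (t', k') 0 = fTrue e t' k') →
    ∀ q : Int × Int,
      ((PySem.List.pyRange a (c + (t - s) + 1) 1).foldl (bInner e t) dp).getD q 0 =
        if q.1 = t ∧ a ≤ q.2 ∧ q.2 ≤ c + (t - s) then fTrue e q.1 q.2 else dp.getD q 0 := by
  intro n
  induction n with
  | zero =>
    intro a dp hn ha hInv q
    rw [PySem.List.pyRange_one_eq_nil (by omega)]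
    simp only [List.foldl]
    rw [if_neg (by rintro ⟨_, h2, h3⟩; omega)]
  | succ n ih =>
    intro a dp hn ha hInv q
    rw [PySem.List.pyRange_one_cons (by omega)]
    simp only [List.foldl]
    have hcell := bInner_getD s e c hs t a ht1 ht2 ha (by omega) dp hInv
    have hInv' : ∀ t' k', t + 1 ≤ t' → t' ≤ e → c ≤ k' → k' ≤ c + (t' - s) →
        (bInner e t dp a).getD (t', k') 0 = fTrue e t' k' := by
      intro t' k' h1 h2 h3 h4
      rw [hcell (t', k'), if_neg (by rw [Prod.mk.injEq]; rintro ⟨h5, h6⟩; omega)]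
      exact hInv t' k' h1 h2 h3 h4
    rw [ih (a+1) (bInner e t dp a) (by omega) (by omega) hInv' q, hcell q]
    by_cases hq : q = (t, a)
    · subst hq
      have hcond : ¬ (a + 1 ≤ a) := by omega
      have hle : a ≤ c + (t - s) := by omega
      simp [hcond, hle]
    · rw [if_neg hq]
      by_cases h1 : q.1 = t ∧ a + 1 ≤ q.2 ∧ q.2 ≤ c + (t - s)
      · rw [if_pos h1, if_pos ⟨h1.1, by omega, h1.2.2⟩]
      · by_cases h2 : q.1 = t ∧ a ≤ q.2 ∧ q.2 ≤ c + (t - s)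
        · exfalso
          apply hq
          have hq2 : q.2 = a := by omega
          rw [Prod.ext_iff]
          exact ⟨h2.1, hq2⟩
        · rw [if_neg h1, if_neg h2]

-- the outer `for t` loop fills every row from e down to s
theorem bOuter_getD (s e c : Int) (hs : 0 ≤ s) :
    ∀ (n : Nat) (t0 : Int) (dp : PySem.Dict (Int × Int) Int),
    (t0 - (s - 1)).toNat = n → s - 1 ≤ t0 → t0 ≤ e →
    (∀ t' k', t0 + 1 ≤ t' → t' ≤ e → c ≤ k' → k' ≤ c + (t' - s) →
      dp.getD (t', k') 0 = fTrue e t' k') →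
    ∀ t' k', s ≤ t' → t' ≤ e → c ≤ k' → k' ≤ c + (t' - s) →
      ((PySem.List.pyRange t0 (s-1) (-1)).foldl
        (fun dp t => (PySem.List.pyRange c (c + (t - s) + 1) 1).foldl (bInner e t) dp)
        dp).getD (t', k') 0 = fTrue e t' k' := by
  intro n
  induction n with
  | zero =>
    intro t0 dp hn h1 h2 hInv t' k' g1 g2 g3 g4
    rw [PySem.List.pyRange_neg_one_eq_nil (by omega)]
    exact hInv t' k' (by omega) g2 g3 g4
  | succ n ih =>
    intro t0 dp hn h1 h2 hInv t' k' g1 g2 g3 g4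
    rw [PySem.List.pyRange_neg_one_cons (by omega)]
    simp only [List.foldl]
    have hrow := bRow_getD s e c hs t0 (by omega) h2 ((c + (t0 - s) + 1 - c).toNat) c dp rfl
      le_rfl hInv
    have hInv' : ∀ t'' k'', t0 - 1 + 1 ≤ t'' → t'' ≤ e → c ≤ k'' → k'' ≤ c + (t'' - s) →
        ((PySem.List.pyRange c (c + (t0 - s) + 1) 1).foldl (bInner e t0) dp).getD (t'', k'') 0 =
          fTrue e t'' k'' := by
      intro t'' k'' m1 m2 m3 m4
      rw [hrow (t'', k'')]
      by_cases hm : t'' = t0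
      · rw [if_pos ⟨hm, m3, by omega⟩]
      · rw [if_neg (by rintro ⟨h5, _⟩; exact hm h5)]
        exact hInv t'' k'' (by omega) m2 m3 m4
    exact ih (t0 - 1) _ (by omega) (by omega) (by omega) hInv' t' k' g1 g2 g3 g4

-- ===== VERDICT (by name: the statement is the Claim_ definition above) =====
theorem f_spec : Claim_equal_f := by
  intro s e c _ hpre
  unfold Spec_f f f_alt
  by_cases hgt : e < s
  · rw [if_pos hgt, fA_gt _ _ _ _ hgt]
  · rw [if_neg hgt]
    have hse : s ≤ e := le_of_not_gt hgt
    by_cases hs : 0 ≤ s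
    · have := bOuter_getD s e c hs ((e - (s-1)).toNat) e PySem.Dict.empty rfl (by omega) (by omega)
        (by intro t' k' h1 h2 _ _; omega) s c (by omega) hse (by omega) (by omega)
      rw [this]; rfl
    · -- s = e < 0, c ≤ 15: single cell, computed directly
      have hsec : s = e ∧ c ≤ 15 := by unfold Pre_f at hpre; omega
      obtain ⟨rfl, hc⟩ := hsec
      rw [PySem.List.pyRange_neg_one_cons (by omega), PySem.List.pyRange_neg_one_eq_nil (by omega)]
      have h1 : c + (s - s) + 1 = c + 1 := by ring
      simp only [List.foldl, h1]
      rw [PySem.List.pyRange_one_singleton]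
      simp only [List.foldl, bInner, hc, and_true]
      have h2 : (s + 2 - s).toNat = 2 := by omega
      rw [h2]
      simp [fA, hc, PySem.Dict.getD_insert_self]
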